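-- pv_equiv track=rewrite | github.com/pkhpanke/AI_analyze_tool | thd_reviews.py | consolidate_ages
-- ===== SOURCE A (Python) =====
-- def consolidate_ages(data):
--     # Define new age groups and their corresponding keys in the original dictionary
--     new_age_groups = {
--         "18to34": ["18to24", "25to34"],
--         "35to54": ["35to44", "45to54"],
--         "55orover": ["55to64", "65orOver"]
--     }
--
--     # Initialize a new dictionary to store the consolidated data
--     consolidated_data = {}
--
--     # Iterate through the new age groups, summing and assigning as appropriate
--     for new_key, old_keys in new_age_groups.items():
--         # Sum the values of the old keys from the original dictionary
--         sum_values = sum(data[old_key] for old_key in old_keys if old_key in data)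
--         # Assign this sum to the corresponding new key in the consolidated dictionary
--         consolidated_data[new_key] = sum_values
--
--     return consolidated_data
-- ===== SOURCE B (Python) =====
-- def consolidate_ages(data):
--     # Reverse lookup: old bucket -> consolidated group; one pass over data.
--     reverse = {
--         "18to24": "18to34", "25to34": "18to34",
--         "35to44": "35to54", "45to54": "35to54",
--         "55to64": "55orover", "65orOver": "55orover",
--     }
--     totals = {"18to34": 0, "35to54": 0, "55orover": 0}
--     for key, value in data.items():
--         group = reverse.get(key)
--         if group is not None:
--             totals[group] += value
--     return totals
-- ===== Notes on version B (the rewrite author's own statement) =====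
-- stated objective: alternative
-- what changed: Instead of iterating the three groups and probing the input dict for each old bucket, B builds a reverse old-bucket-to-group map, pre-seeds the three group totals with 0, and accumulates in a single pass over data.items(); the precondition only excludes association lists with duplicate keys, which do not encode a Python dict.
import Mathlib
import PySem

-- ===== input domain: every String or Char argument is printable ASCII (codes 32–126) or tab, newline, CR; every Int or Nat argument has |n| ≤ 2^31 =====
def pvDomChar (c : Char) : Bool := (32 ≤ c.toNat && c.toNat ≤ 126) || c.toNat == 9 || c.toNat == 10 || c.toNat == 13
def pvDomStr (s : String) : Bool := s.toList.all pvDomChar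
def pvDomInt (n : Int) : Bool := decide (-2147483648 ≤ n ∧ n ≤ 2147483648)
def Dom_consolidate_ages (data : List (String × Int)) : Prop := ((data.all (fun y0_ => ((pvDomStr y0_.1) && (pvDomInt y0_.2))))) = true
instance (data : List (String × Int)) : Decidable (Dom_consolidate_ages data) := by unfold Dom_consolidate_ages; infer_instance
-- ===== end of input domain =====

-- B replaces A's per-group probing of the dict by a reverse bucket->group map and one pass over the items (alternative decomposition, same cost).


-- ===== PORT A =====
-- first-match lookup on the association list: exact for Python's `k in d` / `d[k]` / `d.get(k)` on a dict encoded in insertion order with unique keys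
def pvLookup? {α : Type} : List (String × α) → String → Option α
  | [], _ => none
  | (k, v) :: t, key => if k = key then some v else pvLookup? t key

-- sum(data[old_key] for old_key in old_keys if old_key in data)
def pvSumOld (data : List (String × Int)) (olds : List String) : Int :=
  olds.foldl (fun s k => match pvLookup? data k with | some v => s + v | none => s) 0

def consolidate_ages (data : List (String × Int)) : List (String × Int) :=
  let new_age_groups : List (String × List String) :=
    [("18to34", ["18to24", "25to34"]), ("35to54", ["35to44", "45to54"]), ("55orover", ["55to64", "65orOver"])]
  -- consolidated_data[new_key] = sum_values: the three new keys are distinct and fresh, so dict insertion appends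
  new_age_groups.foldl (fun acc g => acc ++ [(g.1, pvSumOld data g.2)]) []

-- ===== PORT B =====
def pvReverse : List (String × String) :=
  [("18to24", "18to34"), ("25to34", "18to34"), ("35to44", "35to54"),
   ("45to54", "35to54"), ("55to64", "55orover"), ("65orOver", "55orover")]

-- totals[group] += value: in-place update of the first (unique) matching key
def pvAddTo : List (String × Int) → String → Int → List (String × Int)
  | [], _, _ => []
  | (k, v) :: t, key, d => if k = key then (k, v + d) :: t else (k, v) :: pvAddTo t key d

def consolidate_ages_alt (data : List (String × Int)) : List (String × Int) :=
  data.foldl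
    (fun totals kv =>
      match pvLookup? pvReverse kv.1 with
      | some g => pvAddTo totals g kv.2
      | none => totals)
    [("18to34", 0), ("35to54", 0), ("55orover", 0)]

-- ===== PRECONDITION & SPEC =====
-- Pre_ excludes association lists with duplicate keys: they do not encode a Python dict
-- (the Python function's argument is a dict, whose keys are necessarily unique).
def Pre_consolidate_ages (data : List (String × Int)) : Prop := (data.map Prod.fst).Nodup
instance (data : List (String × Int)) : Decidable (Pre_consolidate_ages data) := by
  unfold Pre_consolidate_ages; infer_instance

def pvWitness_consolidate_ages : (List (String × Int)) := [("18to24", 3), ("55to64", 2), ("other", 7)]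

def Spec_consolidate_ages (data : List (String × Int)) (out : List (String × Int)) : Prop := out = consolidate_ages_alt data
instance (data : List (String × Int)) (out : List (String × Int)) : Decidable (Spec_consolidate_ages data out) := by unfold Spec_consolidate_ages; infer_instance

-- ===== CLAIM (what is proved, stated in full; the proofs are below) =====
def Claim_equal_consolidate_ages : Prop := ∀ (data : List (String × Int)), Dom_consolidate_ages data → Pre_consolidate_ages data → Spec_consolidate_ages data (consolidate_ages data)

-- ===== LEMMAS AND PROOFS =====

-- value contributed to one group: sum of the entries whose key satisfies p
def pvS (p : String → Bool) : List (String × Int) → Int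
  | [] => 0
  | kv :: t => (if p kv.1 then kv.2 else 0) + pvS p t

def pvP1 (k : String) : Bool := k = "18to24" || k = "25to34"
def pvP2 (k : String) : Bool := k = "35to44" || k = "45to54"
def pvP3 (k : String) : Bool := k = "55to64" || k = "65orOver"

theorem pvStep (totals : List (String × Int)) (k : String) (v : Int) :
    (match pvLookup? pvReverse k with
      | some g => pvAddTo totals g v
      | none => totals) =
    if k = "18to24" ∨ k = "25to34" then pvAddTo totals "18to34" v
    else if k = "35to44" ∨ k = "45to54" then pvAddTo totals "35to54" v
    else if k = "55to64" ∨ k = "65orOver" then pvAddTo totals "55orover" v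
    else totals := by
  by_cases h1 : k = "18to24" <;> by_cases h2 : k = "25to34" <;>
    by_cases h3 : k = "35to44" <;> by_cases h4 : k = "45to54" <;>
    by_cases h5 : k = "55to64" <;> by_cases h6 : k = "65orOver" <;>
    simp_all [pvLookup?, pvReverse, eq_comm]

theorem pvFoldB (d : List (String × Int)) (x y z : Int) :
    d.foldl
      (fun totals kv =>
        match pvLookup? pvReverse kv.1 with
        | some g => pvAddTo totals g kv.2
        | none => totals)
      [("18to34", x), ("35to54", y), ("55orover", z)] =
    [("18to34", x + pvS pvP1 d), ("35to54", y + pvS pvP2 d), ("55orover", z + pvS pvP3 d)] := by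
  induction d generalizing x y z with
  | nil => simp [pvS]
  | cons kv t ih =>
    obtain ⟨k, v⟩ := kv
    rw [List.foldl_cons]
    simp only []
    rw [pvStep]
    split_ifs with hA hB hC
    · rw [show pvAddTo [("18to34", x), ("35to54", y), ("55orover", z)] "18to34" v =
          [("18to34", x + v), ("35to54", y), ("55orover", z)] by simp [pvAddTo], ih]
      rcases hA with h | h <;> subst h <;> simp [pvS, pvP1, pvP2, pvP3] <;> ring_nf
    · rw [show pvAddTo [("18to34", x), ("35to54", y), ("55orover", z)] "35to54" v =
          [("18to34", x), ("35to54", y + v), ("55orover", z)] by simp [pvAddTo], ih]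
      rcases hB with h | h <;> subst h <;> simp [pvS, pvP1, pvP2, pvP3] <;> ring_nf
    · rw [show pvAddTo [("18to34", x), ("35to54", y), ("55orover", z)] "55orover" v =
          [("18to34", x), ("35to54", y), ("55orover", z + v)] by simp [pvAddTo], ih]
      rcases hC with h | h <;> subst h <;> simp [pvS, pvP1, pvP2, pvP3] <;> ring_nf
    · rw [ih]
      have : pvP1 k = false ∧ pvP2 k = false ∧ pvP3 k = false := by
        simp_all [pvP1, pvP2, pvP3]
      simp [pvS, this.1, this.2.1, this.2.2]

theorem pvLookup_not_mem {α : Type} (t : List (String × α)) (k : String)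
    (h : k ∉ t.map Prod.fst) : pvLookup? t k = none := by
  induction t with
  | nil => rfl
  | cons kv t ih =>
    simp only [List.map_cons, List.mem_cons] at h
    rw [not_or] at h
    simp [pvLookup?, Ne.symm h.1, ih h.2]

theorem pvS_two (a b : String) (hab : a ≠ b) (d : List (String × Int))
    (h : (d.map Prod.fst).Nodup) :
    pvS (fun k => k = a || k = b) d = (pvLookup? d a).getD 0 + (pvLookup? d b).getD 0 := by
  induction d with
  | nil => simp [pvS, pvLookup?]
  | cons kv t ih =>
    obtain ⟨k, v⟩ := kv
    simp only [List.map_cons, List.nodup_cons] at h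
    by_cases hk : k = a
    · subst hk
      simp [pvS, pvLookup?, hab, ih h.2, pvLookup_not_mem t _ h.1]
    · by_cases hk' : k = b
      · subst hk'
        simp [pvS, pvLookup?, hk, ih h.2, pvLookup_not_mem t _ h.1]
        ring
      · simp [pvS, pvLookup?, hk, hk', ih h.2]

theorem pvSumOld_pair (data : List (String × Int)) (a b : String) :
    pvSumOld data [a, b] = (pvLookup? data a).getD 0 + (pvLookup? data b).getD 0 := by
  simp only [pvSumOld, List.foldl_cons, List.foldl_nil]
  cases pvLookup? data a <;> cases pvLookup? data b <;> simp

-- ===== VERDICT (by name: the statement is the Claim_ definition above) =====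
theorem consolidate_ages_spec : Claim_equal_consolidate_ages := by
  intro data _ hpre
  unfold Spec_consolidate_ages consolidate_ages consolidate_ages_alt
  rw [pvFoldB]
  simp only [List.foldl_cons, List.foldl_nil, List.nil_append, List.cons_append,
    pvSumOld_pair]
  rw [show pvS pvP1 data = pvS (fun k => k = "18to24" || k = "25to34") data from rfl,
      show pvS pvP2 data = pvS (fun k => k = "35to44" || k = "45to54") data from rfl,
      show pvS pvP3 data = pvS (fun k => k = "55to64" || k = "65orOver") data from rfl,
      pvS_two _ _ (by decide) data hpre, pvS_two _ _ (by decide) data hpre,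
      pvS_two _ _ (by decide) data hpre]
  simp
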